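-- pv_equiv track=rewrite | github.com/ndt93/FinancialML | src/features/entropy.py | _longest_match
-- ===== SOURCE A (Python) =====
-- def _longest_match(msg, i, n):
--     """
--     Find the longest string in the n-size window before i that matches a string in the n-size window from i.
--     Set n = i for expanding window.
--     """
--     match = ''
--     for length in range(n):
--         msg_right = msg[i:i+length+1]
--         for j in range(i-n, i):
--             msg_left = msg[j:j+length+1]
--             if msg_right == msg_left:
--                 match = msg_right
--                 break
--     return len(match) + 1, match
-- ===== SOURCE B (Python) =====
-- def _longest_match(msg, i, n):
--     # Swapped loop nesting with pruning: per window position, scan candidate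
--     # lengths longest-first but only above the best found so far; first hit is
--     # that position's maximum, so `best` ends as the overall maximum length.
--     best = -1
--     for j in range(i - n, i):
--         for length in range(n - 1, best, -1):
--             if msg[j:j+length+1] == msg[i:i+length+1]:
--                 best = length
--                 break
--     if best < 0:
--         return 1, ''
--     m = msg[i:i+best+1]
--     return len(m) + 1, m
-- ===== Notes on version B (the rewrite author's own statement) =====
-- stated objective: alternative
-- what changed: B swaps the loop nesting and changes the accumulator: per prior-window position it scans candidate lengths longest-first, only above the integer best found so far, taking the first hit (that position's maximum), and slices the message once at the end; A sweeps all lengths forwards over the whole window, overwriting a string accumulator at every hit.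
import Mathlib
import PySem

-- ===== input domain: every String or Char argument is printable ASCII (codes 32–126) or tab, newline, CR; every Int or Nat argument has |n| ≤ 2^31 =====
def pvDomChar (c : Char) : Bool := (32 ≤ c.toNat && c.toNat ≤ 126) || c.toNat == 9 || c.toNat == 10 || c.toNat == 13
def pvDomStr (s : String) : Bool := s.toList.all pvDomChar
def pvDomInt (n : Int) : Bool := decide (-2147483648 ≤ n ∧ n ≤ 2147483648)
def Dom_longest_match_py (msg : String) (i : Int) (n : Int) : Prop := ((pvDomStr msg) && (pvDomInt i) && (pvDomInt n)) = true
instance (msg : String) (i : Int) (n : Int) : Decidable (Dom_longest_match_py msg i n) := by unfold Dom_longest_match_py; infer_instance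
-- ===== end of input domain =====

-- B swaps the loop nesting: per window position it scans candidate lengths
-- longest-first, only above the best found so far, and keeps the max in an
-- integer accumulator, slicing once at the end; A sweeps all lengths forwards
-- over the whole window overwriting a string accumulator. Same return value on
-- every input (alternative decomposition with pruning/early exit).

-- ===== PORT A =====
def longest_match_py (msg : String) (i : Int) (n : Int) : Int × String :=
  let m := (PySem.List.pyRange 0 n 1).foldl (fun acc length =>
    let msg_right := PySem.Str.slice msg (some i) (some (i + length + 1))
    -- for j in range(i-n, i): compare msg_left, set match and break on first hit;
    -- the stored value msg_right does not depend on j, so the loop-with-break is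
    -- the existence test over the window.
    if (PySem.List.pyRange (i - n) i 1).any (fun j =>
        PySem.Str.slice msg (some j) (some (j + length + 1)) == msg_right)
    then msg_right else acc) ""
  (PySem.Str.len m + 1, m)

-- ===== PORT B =====
def longest_match_py_alt (msg : String) (i : Int) (n : Int) : Int × String :=
  -- inner loop-with-break over range(n-1, best, -1): first matching length if any,
  -- else best unchanged
  let best := (PySem.List.pyRange (i - n) i 1).foldl (fun best j =>
    ((PySem.List.pyRange (n - 1) best (-1)).find? (fun length =>
        PySem.Str.slice msg (some j) (some (j + length + 1)) ==
        PySem.Str.slice msg (some i) (some (i + length + 1)))).getD best) (-1)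
  if best < 0 then (1, "")
  else
    let m := PySem.Str.slice msg (some i) (some (i + best + 1))
    (PySem.Str.len m + 1, m)

-- ===== PRECONDITION & SPEC =====
def Spec_longest_match_py (msg : String) (i : Int) (n : Int) (out : Int × String) : Prop := out = longest_match_py_alt msg i n
instance (msg : String) (i : Int) (n : Int) (out : Int × String) : Decidable (Spec_longest_match_py msg i n out) := by unfold Spec_longest_match_py; infer_instance

-- ===== CLAIM (what is proved, stated in full; the proofs are below) =====
def Claim_equal_longest_match_py : Prop := ∀ (msg : String) (i : Int) (n : Int), Dom_longest_match_py msg i n → Spec_longest_match_py msg i n (longest_match_py msg i n)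

-- ===== LEMMAS AND PROOFS =====

-- A left fold that overwrites its accumulator at every hit ends at the LAST hit,
-- i.e. at the first hit of the reversed list.
theorem foldl_overwrite_eq_find?_reverse {α β : Type} (P : α → Bool) (g : α → β)
    (L : List α) (a : β) :
    L.foldl (fun acc x => if P x then g x else acc) a
      = ((L.reverse.find? P).map g).getD a := by
  induction L generalizing a with
  | nil => simp
  | cons x L ih =>
      simp only [List.foldl_cons, List.reverse_cons, List.find?_append]
      rw [ih]
      cases h : L.reverse.find? P with
      | some r => simp [Option.or]
      | none => simp [Option.or]; by_cases hx : P x <;> simp [hx]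

theorem foldl_max_le (l : List Int) (a m : Int) (ha : a ≤ m) (hub : ∀ x ∈ l, x ≤ m) :
    l.foldl max a ≤ m := by
  induction l generalizing a with
  | nil => simpa using ha
  | cons x l ih =>
      simp only [List.foldl_cons]
      exact ih _ (max_le ha (hub x (by simp))) (fun y hy => hub y (by simp [hy]))

-- In a strictly decreasing list, find? returns the MAXIMUM element satisfying p.
theorem find?_is_max_of_sorted : ∀ (R : List Int), R.Pairwise (· > ·) →
    ∀ (p : Int → Bool) (r : Int), R.find? p = some r →
    ∀ x ∈ R, p x = true → x ≤ r := by
  intro R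
  induction R with
  | nil => intro _ p r hr; simp at hr
  | cons y R ih =>
      intro hsort p r hr x hx hpx
      by_cases hy : p y = true
      · rw [List.find?_cons_of_pos hy] at hr
        cases hr
        rcases List.mem_cons.mp hx with rfl | hxR
        · exact le_rfl
        · exact le_of_lt ((List.pairwise_cons.mp hsort).1 x hxR)
      · rw [List.find?_cons_of_neg (by simpa using hy)] at hr
        rcases List.mem_cons.mp hx with rfl | hxR
        · exact absurd hpx hy
        · exact ih (List.pairwise_cons.mp hsort).2 p r hr x hxR hpx

-- Pruning step: the first hit of a descending scan stopped at threshold b (with b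
-- as the miss default) is exactly max b (first hit of the full descending scan).
theorem find?_threshold (p : Int → Bool) (a b : Int) (hb : (-1:Int) ≤ b) :
    ((PySem.List.pyRange a b (-1)).find? p).getD b
      = max b (((PySem.List.pyRange a (-1) (-1)).find? p).getD (-1)) := by
  by_cases hab : a ≤ b
  · rw [PySem.List.pyRange_neg_one_eq_nil hab]
    simp only [List.find?_nil, Option.getD_none]
    cases hf : (PySem.List.pyRange a (-1) (-1)).find? p with
    | none => simp; omega
    | some v =>
        have hv := PySem.List.mem_pyRange_neg_one.mp (List.mem_of_find?_eq_some hf)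
        simp; omega
  · rw [not_le] at hab
    have hsplit : PySem.List.pyRange a (-1) (-1)
        = PySem.List.pyRange a b (-1) ++ PySem.List.pyRange b (-1) (-1) := by
      rw [PySem.List.pyRange_neg_one_eq_reverse a (-1),
          PySem.List.pyRange_neg_one_eq_reverse a b,
          PySem.List.pyRange_neg_one_eq_reverse b (-1),
          ← List.reverse_append]
      norm_num
      rw [← PySem.List.pyRange_one_append 0 (b + 1) (a + 1) (by omega) (by omega)]
    rw [hsplit, List.find?_append]
    cases hf : (PySem.List.pyRange a b (-1)).find? p with
    | some v =>
        have hv := PySem.List.mem_pyRange_neg_one.mp (List.mem_of_find?_eq_some hf)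
        simp [Option.or]; omega
    | none =>
        simp only [Option.or, Option.getD_none]
        cases hg : (PySem.List.pyRange b (-1) (-1)).find? p with
        | none => simp; omega
        | some v =>
            have hv := PySem.List.mem_pyRange_neg_one.mp (List.mem_of_find?_eq_some hg)
            simp; omega

-- The pruned fold computes the same as folding max of each position's full scan.
theorem foldl_threshold (W : List Int) (P : Int → Int → Bool) (a : Int) :
    ∀ b, (-1:Int) ≤ b →
    W.foldl (fun best j => ((PySem.List.pyRange a best (-1)).find? (P j)).getD best) b
      = W.foldl (fun best j =>
          max best (((PySem.List.pyRange a (-1) (-1)).find? (P j)).getD (-1))) b := by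
  induction W with
  | nil => intro b _; rfl
  | cons j W ih =>
      intro b hb
      simp only [List.foldl_cons]
      rw [find?_threshold (P j) a b hb]
      exact ih _ (le_trans hb (le_max_left _ _))

-- Core: the running max over window positions of each position's first (i.e.
-- largest, since R is strictly decreasing and nonnegative) matching length
-- equals the first length in R matched by SOME position.
theorem max_first_per_j_eq_first_any (W R : List Int) (P : Int → Int → Bool)
    (hsort : R.Pairwise (· > ·)) (hpos : ∀ l ∈ R, (0:Int) ≤ l) :
    W.foldl (fun best j => max best ((R.find? (P j)).getD (-1))) (-1)
      = (R.find? (fun l => W.any (fun j => P j l))).getD (-1) := by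
  rw [← List.foldl_map (f := fun j => ((R.find? (P j)).getD (-1))) (g := max) (l := W) (init := (-1:Int))]
  have hfge : ∀ j : Int, (-1:Int) ≤ (R.find? (P j)).getD (-1) := by
    intro j
    cases hf : R.find? (P j) with
    | none => simp
    | some v =>
        have := hpos v (List.mem_of_find?_eq_some hf)
        simp; omega
  cases hfr : R.find? (fun l => W.any (fun j => P j l)) with
  | none =>
      simp only [Option.getD_none]
      refine le_antisymm (foldl_max_le _ _ _ le_rfl ?_) ((PySem.List.le_foldl_max _ _).1)
      intro x hx
      rcases List.mem_map.mp hx with ⟨j, hjW, rfl⟩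
      cases hf : R.find? (P j) with
      | none => simp
      | some v =>
          have hvP : P j v = true := List.find?_some hf
          have := List.find?_eq_none.mp hfr v (List.mem_of_find?_eq_some hf)
          exact absurd (List.any_eq_true.mpr ⟨j, hjW, hvP⟩) (by simpa using this)
  | some r =>
      have hrR := List.mem_of_find?_eq_some hfr
      have hQr := List.find?_some (p := fun l => W.any (fun j => P j l)) hfr
      obtain ⟨j1, hj1W, hj1P⟩ := List.any_eq_true.mp (by simpa using hQr)
      simp only [Option.getD_some]
      apply le_antisymm
      · -- every position's first match is ≤ r
        apply foldl_max_le _ _ _ (by have := hpos r hrR; omega)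
        intro x hx
        rcases List.mem_map.mp hx with ⟨j, hjW, rfl⟩
        cases hf : R.find? (P j) with
        | none => have := hpos r hrR; simp; omega
        | some v =>
            have hvR := List.mem_of_find?_eq_some hf
            have hvP : P j v = true := List.find?_some hf
            have := find?_is_max_of_sorted R hsort _ r hfr v hvR
              (List.any_eq_true.mpr ⟨j, hjW, hvP⟩)
            simpa using this
      · -- position j1 matches r, so its first match is ≥ r
        obtain ⟨v1, hv1⟩ : ∃ v1, R.find? (P j1) = some v1 := by
          cases hf1 : R.find? (P j1) with
          | some v1 => exact ⟨v1, rfl⟩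
          | none =>
              have := List.find?_eq_none.mp hf1 r hrR
              exact absurd hj1P (by simpa using this)
        have h1 : r ≤ v1 := find?_is_max_of_sorted R hsort _ v1 hv1 r hrR hj1P
        have h2 := (PySem.List.le_foldl_max
            (W.map (fun j => ((R.find? (P j)).getD (-1)))) (-1)).2
            _ (List.mem_map_of_mem hj1W)
        rw [hv1] at h2
        simp only [Option.getD_some] at h2
        omega

-- ===== VERDICT (by name: the statement is the Claim_ definition above) =====
theorem longest_match_py_spec : Claim_equal_longest_match_py := by
  intro msg i n _
  unfold Spec_longest_match_py longest_match_py longest_match_py_alt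
  have hrev : PySem.List.pyRange (n - 1) (-1) (-1)
      = (PySem.List.pyRange 0 n 1).reverse := by
    rw [PySem.List.pyRange_neg_one_eq_reverse]; norm_num
  set W := PySem.List.pyRange (i - n) i 1 with hW
  set L := PySem.List.pyRange 0 n 1 with hL
  set P : Int → Int → Bool := fun j length =>
      PySem.Str.slice msg (some j) (some (j + length + 1)) ==
      PySem.Str.slice msg (some i) (some (i + length + 1)) with hP
  have hposL : ∀ l ∈ L.reverse, (0:Int) ≤ l := by
    intro l hl
    rw [List.mem_reverse, hL, PySem.List.mem_pyRange_one] at hl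
    omega
  have hsortL : L.reverse.Pairwise (· > ·) := by
    rw [List.pairwise_reverse]
    exact (PySem.List.pairwise_lt_pyRange_one 0 n).imp (fun h => h)
  rw [foldl_threshold W P (n - 1) (-1) le_rfl, hrev]
  rw [max_first_per_j_eq_first_any W L.reverse P hsortL hposL]
  rw [foldl_overwrite_eq_find?_reverse
        (fun length => W.any (fun j => P j length))
        (fun length => PySem.Str.slice msg (some i) (some (i + length + 1))) L ""]
  cases hf : L.reverse.find? (fun length => W.any (fun j => P j length)) with
  | none => simp
  | some r =>
      have hr : (0:Int) ≤ r := hposL r (List.mem_of_find?_eq_some hf)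
      simp only [Option.getD_some, Option.map_some]
      rw [if_neg (by omega)]
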